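-- pv_equiv track=rewrite | github.com/ismael2395/ShapeMeasurementFisherFormalism | smff/analysis/gparameters.py | convert_params_id
-- ===== SOURCE A (Python) =====
-- def convert_params_id(params):
--     """Convert a dictionary params in the format of :attr:`params` to a
--     dictionary in the format :attr:`id_params`
--     """
--     id_params = {}
--     ids = []
--     for param in params.keys():
--         if param[-1] not in ids:
--             ids.append(param[-1])  # appends last character of param
--
--     for gal_id in ids:
--         ID_params = {}
--         for param in params.keys():
--             if param[-1] == gal_id:
--                 # slice last 2 characters to avoid '_1'
--                 ID_params[param[:-2]] = params[param]
--         id_params[gal_id] = ID_params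
--
--     return id_params
-- ===== SOURCE B (Python) =====
-- def convert_params_id(params):
--     id_params = {}
--     for param, value in params.items():
--         id_params.setdefault(param[-1], {})[param[:-2]] = value
--     return id_params
-- ===== Notes on version B (the rewrite author's own statement) =====
-- stated objective: idiomatic
-- what changed: A first collects the distinct last-character ids and then rescans all keys once per id to build each inner dict; B makes a single pass over the dict, routing each entry into its group with setdefault, so the id list and the per-id rescans disappear.
import Mathlib
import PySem

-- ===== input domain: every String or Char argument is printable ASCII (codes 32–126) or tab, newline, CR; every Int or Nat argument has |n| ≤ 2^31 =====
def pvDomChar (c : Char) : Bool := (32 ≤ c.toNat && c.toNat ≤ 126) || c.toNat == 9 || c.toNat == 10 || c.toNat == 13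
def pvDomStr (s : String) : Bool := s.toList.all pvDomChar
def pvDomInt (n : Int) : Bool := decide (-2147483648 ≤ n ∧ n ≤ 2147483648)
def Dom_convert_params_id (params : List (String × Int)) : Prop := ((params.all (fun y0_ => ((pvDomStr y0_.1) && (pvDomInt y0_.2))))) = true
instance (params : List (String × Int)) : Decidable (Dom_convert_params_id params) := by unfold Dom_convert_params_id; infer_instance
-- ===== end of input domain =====

-- B replaces A's collect-distinct-ids-then-rescan-per-id nested loops by a single
-- pass over the dict that groups each entry with setdefault; same return value.

-- ===== PORT A =====
-- param[-1] as the 1-character string: ported as the slice param[-1:], which agrees with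
-- Python's param[-1] on every nonempty key; Pre_ excludes the empty key, where Python raises.
def pvLastChar (s : String) : String := PySem.Str.slice s (some (-1)) none
-- param[:-2]
def pvPrefix (s : String) : String := PySem.Str.slice s none (some (-2))

def convert_params_id (params : List (String × Int)) : List (String × List (String × Int)) :=
  let d : PySem.Dict String Int := PySem.Dict.ofList params
  -- ids = []; for param in params.keys(): if param[-1] not in ids: ids.append(param[-1])
  let ids : List String :=
    d.keys.foldl (fun ids param =>
      if pvLastChar param ∈ ids then ids else ids ++ [pvLastChar param]) []
  -- for gal_id in ids: ID_params = {}; for param in params.keys(): …; id_params[gal_id] = ID_params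
  let id_params : PySem.Dict String (PySem.Dict String Int) :=
    ids.foldl (fun id_params gal_id =>
      let ID_params : PySem.Dict String Int :=
        d.keys.foldl (fun ID_params param =>
          if pvLastChar param = gal_id then
            ID_params.insert (pvPrefix param) (d.getD param 0)
          else ID_params) PySem.Dict.empty
      id_params.insert gal_id ID_params) PySem.Dict.empty
  id_params.items.map (fun p => (p.1, p.2.items))

-- ===== PORT B =====
def convert_params_id_alt (params : List (String × Int)) : List (String × List (String × Int)) :=
  let d : PySem.Dict String Int := PySem.Dict.ofList params
  -- for param, value in params.items(): id_params.setdefault(param[-1], empty dict)[param[:-2]] = value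
  let id_params : PySem.Dict String (PySem.Dict String Int) :=
    d.items.foldl (fun acc pv =>
      acc.modify (pvLastChar pv.1) PySem.Dict.empty
        (fun inner => inner.insert (pvPrefix pv.1) pv.2)) PySem.Dict.empty
  id_params.items.map (fun p => (p.1, p.2.items))

-- ===== PRECONDITION & SPEC =====
-- Pre_ excludes only inputs containing the empty-string key, on which Python's param[-1] raises IndexError.
def Pre_convert_params_id (params : List (String × Int)) : Prop :=
  ∀ p ∈ params, p.1 ≠ ""
instance (params : List (String × Int)) : Decidable (Pre_convert_params_id params) := by
  unfold Pre_convert_params_id; infer_instance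

def pvWitness_convert_params_id : (List (String × Int)) := [("a_1", 3), ("b_1", 4), ("a_2", 5)]

def Spec_convert_params_id (params : List (String × Int)) (out : List (String × List (String × Int))) : Prop := out = convert_params_id_alt params
instance (params : List (String × Int)) (out : List (String × List (String × Int))) : Decidable (Spec_convert_params_id params out) := by unfold Spec_convert_params_id; infer_instance

-- ===== CLAIM (what is proved, stated in full; the proofs are below) =====
def Claim_equal_convert_params_id : Prop := ∀ (params : List (String × Int)), Dom_convert_params_id params → Pre_convert_params_id params → Spec_convert_params_id params (convert_params_id params)

-- ===== LEMMAS AND PROOFS =====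

-- proof-side names for the two loop bodies
def pvKey (p : String × Int) : String := pvLastChar p.1

-- A's inner loop, rewritten over the items list (values paired with their keys)
def pvAinner (g : String) (l : List (String × Int)) : PySem.Dict String Int :=
  l.foldl (fun ID p => if pvLastChar p.1 = g then ID.insert (pvPrefix p.1) p.2 else ID)
    PySem.Dict.empty

-- B's grouping fold
def pvBfold (l : List (String × Int)) : PySem.Dict String (PySem.Dict String Int) :=
  l.foldl (fun acc pv =>
      acc.modify (pvLastChar pv.1) PySem.Dict.empty
        (fun inner => inner.insert (pvPrefix pv.1) pv.2)) PySem.Dict.empty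

theorem pvAinner_append (g : String) (l : List (String × Int)) (x : String × Int) :
    pvAinner g (l ++ [x]) =
      if pvLastChar x.1 = g then (pvAinner g l).insert (pvPrefix x.1) x.2 else pvAinner g l := by
  simp [pvAinner, List.foldl_append]

theorem pvAinner_empty_of_not_mem (g : String) (l : List (String × Int))
    (h : g ∉ l.map pvKey) : pvAinner g l = PySem.Dict.empty := by
  have aux : ∀ (l : List (String × Int)) (d : PySem.Dict String Int),
      (∀ p ∈ l, pvLastChar p.1 ≠ g) →
      l.foldl (fun ID p => if pvLastChar p.1 = g then ID.insert (pvPrefix p.1) p.2 else ID) d = d := by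
    intro l
    induction l with
    | nil => intro d _; rfl
    | cons x xs ih =>
      intro d h
      have hx : pvLastChar x.1 ≠ g := h x (by simp)
      simp only [List.foldl_cons, if_neg hx]
      exact ih d (fun p hp => h p (by simp [hp]))
  exact aux l _ (fun p hp hq => h (List.mem_map.2 ⟨p, hp, by simpa [pvKey] using hq⟩))

-- the central invariant: B's single grouping pass produces, as an items list,
-- exactly (first-occurrence-ordered distinct ids) paired with A's per-id dicts
theorem pvBfold_items (l : List (String × Int)) :
    (pvBfold l).items =
      (PySem.Set.ofList (l.map pvKey)).map (fun g => (g, pvAinner g l)) := by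
  induction l using List.reverseRecOn with
  | nil => rfl
  | append_singleton l x ih =>
    have hmod : pvBfold (l ++ [x]) =
        (pvBfold l).insert (pvLastChar x.1)
          (((pvBfold l).getD (pvLastChar x.1) PySem.Dict.empty).insert (pvPrefix x.1) x.2) := by
      simp [pvBfold, List.foldl_append]; rfl
    have hkeys : (pvBfold l).keys = PySem.Set.ofList (l.map pvKey) := by
      simp only [PySem.Dict.keys, ih, List.map_map]
      have h1 : ((fun x : String × PySem.Dict String Int => x.1) ∘ fun g => (g, pvAinner g l)) = id := rfl
      rw [h1, List.map_id]
    have hnodup : (pvBfold l).keys.Nodup := by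
      rw [hkeys]; exact PySem.Set.nodup_ofList _
    have hofl : PySem.Set.ofList ((l ++ [x]).map pvKey)
        = (PySem.Set.ofList (l.map pvKey)).add (pvKey x) := by
      simp [PySem.Set.ofList_append, PySem.Set.update]
    by_cases hmem : pvKey x ∈ PySem.Set.ofList (l.map pvKey)
    · -- the id already exists: modify overwrites in place
      have hcont : (pvBfold l).contains (pvLastChar x.1) = true := by
        rw [PySem.Dict.contains_eq_decide_mem_keys, hkeys]
        simpa [pvKey] using hmem
      have hget : (pvBfold l).getD (pvLastChar x.1) PySem.Dict.empty
          = pvAinner (pvLastChar x.1) l := by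
        apply PySem.Dict.getD_of_mem_items _ _ hnodup
        rw [ih]
        exact List.mem_map_of_mem (by simpa [pvKey] using hmem)
      have hadd : (PySem.Set.ofList (l.map pvKey)).add (pvKey x)
          = PySem.Set.ofList (l.map pvKey) := by
        simp [PySem.Set.add, hmem]
      rw [hmod, PySem.Dict.items_insert_of_contains _ _ hcont, ih, hget, hofl, hadd,
        List.map_map]
      apply List.map_congr_left
      intro g hg
      by_cases hgx : g = pvLastChar x.1
      · subst hgx; simp [pvAinner_append]
      · simp [Function.comp, hgx, Ne.symm hgx, pvAinner_append]
    · -- a fresh id: modify appends a new singleton group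
      have hcont : (pvBfold l).contains (pvLastChar x.1) = false := by
        rw [PySem.Dict.contains_eq_decide_mem_keys, hkeys]
        simpa [pvKey] using hmem
      have hget : (pvBfold l).getD (pvLastChar x.1) PySem.Dict.empty = PySem.Dict.empty :=
        PySem.Dict.getD_of_not_contains _ _ hcont
      have hadd : (PySem.Set.ofList (l.map pvKey)).add (pvKey x)
          = PySem.Set.ofList (l.map pvKey) ++ [pvKey x] := by
        simp [PySem.Set.add, hmem]
      have hnotmem : pvKey x ∉ l.map pvKey := fun h =>
        hmem ((PySem.Set.mem_ofList _ _).2 h)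
      rw [hmod, PySem.Dict.items_insert_of_not_contains _ _ hcont, ih, hget, hofl, hadd,
        List.map_append]
      congr 1
      · apply List.map_congr_left
        intro g hg
        have hgx : pvLastChar x.1 ≠ g := by
          intro h
          exact hmem (by simpa [pvKey, h] using hg)
        simp [pvAinner_append, hgx]
      · have hz : pvAinner (pvLastChar x.1) l = PySem.Dict.empty :=
          pvAinner_empty_of_not_mem _ _ hnotmem
        have hx : pvAinner (pvKey x) (l ++ [x]) = PySem.Dict.empty.insert (pvPrefix x.1) x.2 := by
          rw [pvAinner_append]; simp [pvKey, hz]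
        simp [pvKey] at hx ⊢
        simp [hx]

-- A's result, as the same items list
theorem convert_params_id_items (params : List (String × Int)) :
    convert_params_id params =
      ((PySem.Set.ofList ((PySem.Dict.ofList params).items.map pvKey)).map
        (fun g => (g, pvAinner g (PySem.Dict.ofList params).items))).map
        (fun p => (p.1, p.2.items)) := by
  unfold convert_params_id
  set d := PySem.Dict.ofList params with hd
  have hnodup : d.keys.Nodup := PySem.Dict.nodup_keys_ofList params
  have hitems : d.items = d.keys.map (fun k => (k, d.getD k 0)) :=
    PySem.Dict.items_eq_map_keys d hnodup 0
  -- the ids loop is Set.ofList of the mapped last characters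
  have hids : d.keys.foldl (fun ids param =>
        if pvLastChar param ∈ ids then ids else ids ++ [pvLastChar param]) []
      = PySem.Set.ofList (d.items.map pvKey) := by
    rw [hitems, List.map_map]
    have : (pvKey ∘ fun k => (k, d.getD k 0)) = pvLastChar := by
      funext k; rfl
    rw [this, ← PySem.Set.update_nil_left, PySem.Set.update_map_eq_foldl_add]
    apply PySem.List.foldl_congr_mem
    intro s k _
    simp [PySem.Set.add]
  -- the inner loop over keys is pvAinner over items
  have hinner : ∀ g : String,
      d.keys.foldl (fun ID param =>
        if pvLastChar param = g then ID.insert (pvPrefix param) (d.getD param 0) else ID)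
        PySem.Dict.empty = pvAinner g d.items := by
    intro g
    rw [pvAinner, hitems, List.foldl_map]
  -- the outer loop inserts fresh distinct keys, so it appends
  have hfresh : (∀ g ∈ PySem.Set.ofList (d.items.map pvKey),
      (PySem.Dict.empty : PySem.Dict String (PySem.Dict String Int)).contains g = false) := by
    intro g _; exact PySem.Dict.contains_empty g
  have houter := PySem.Dict.items_foldl_insert_fresh
    (PySem.Set.ofList (d.items.map pvKey)) (fun g => g) (fun g => pvAinner g d.items)
    PySem.Dict.empty hfresh (by simp [PySem.Set.nodup_ofList])
  simp only [hids]
  rw [show (fun id_params gal_id =>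
        PySem.Dict.insert id_params gal_id
          (d.keys.foldl (fun ID param =>
            if pvLastChar param = gal_id then ID.insert (pvPrefix param) (d.getD param 0) else ID)
            PySem.Dict.empty)) =
      (fun id_params gal_id =>
        PySem.Dict.insert id_params ((fun g => g) gal_id) (pvAinner gal_id d.items)) from
    by funext a b; rw [hinner b]]
  rw [houter]
  simp [PySem.Dict.empty]

-- ===== VERDICT (by name: the statement is the Claim_ definition above) =====
theorem convert_params_id_spec : Claim_equal_convert_params_id := by
  intro params _ _
  unfold Spec_convert_params_id
  rw [convert_params_id_items]
  show _ = (pvBfold (PySem.Dict.ofList params).items).items.map (fun p => (p.1, p.2.items))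
  rw [pvBfold_items]
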